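-- pv_equiv track=rewrite | github.com/dxtr-labs/v1.0 | backend/list_all_drivers.py | categorize_driver
-- ===== SOURCE A (Python) =====
-- def categorize_driver(driver_name: str, node_types: list) -> str:
--     """Categorize driver based on name and node types"""
--
--     name_lower = driver_name.lower()
--     node_types_str = ' '.join(node_types).lower()
--
--     # Email drivers
--     if any(word in name_lower for word in ['email', 'gmail', 'smtp', 'imap']):
--         return 'email'
--     if any(word in node_types_str for word in ['email', 'gmail']):
--         return 'email'
--
--     # AI/LLM drivers
--     if any(word in name_lower for word in ['openai', 'ai', 'llm', 'chat', 'langchain']):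
--         return 'ai_llm'
--     if any(word in node_types_str for word in ['openai', 'langchain', 'chat']):
--         return 'ai_llm'
--
--     # HTTP/API drivers
--     if any(word in name_lower for word in ['http', 'api', 'webhook', 'request']):
--         return 'http_api'
--     if any(word in node_types_str for word in ['http', 'webhook']):
--         return 'http_api'
--
--     # Database drivers
--     if any(word in name_lower for word in ['mysql', 'postgres', 'mongodb', 'database', 'sql']):
--         return 'database'
--     if any(word in node_types_str for word in ['mysql', 'postgres', 'mongodb']):
--         return 'database'
--
--     # Google Services
--     if any(word in name_lower for word in ['google', 'gmail', 'drive', 'sheets', 'docs']):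
--         return 'google_services'
--     if any(word in node_types_str for word in ['google', 'gmail']):
--         return 'google_services'
--
--     # Messaging
--     if any(word in name_lower for word in ['slack', 'telegram', 'discord', 'message']):
--         return 'messaging'
--     if any(word in node_types_str for word in ['slack', 'telegram']):
--         return 'messaging'
--
--     # Social Media
--     if any(word in name_lower for word in ['twitter', 'facebook', 'linkedin', 'social']):
--         return 'social_media'
--     if any(word in node_types_str for word in ['twitter']):
--         return 'social_media'
--
--     # File Processing
--     if any(word in name_lower for word in ['file', 'csv', 'json', 'pdf', 'xml']):
--         return 'file_processing'
--     if any(word in node_types_str for word in ['file', 'csv', 'json', 'pdf']):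
--         return 'file_processing'
--
--     # Data Processing
--     if any(word in name_lower for word in ['data', 'processor', 'transform', 'filter', 'set']):
--         return 'data_processing'
--     if any(word in node_types_str for word in ['set', 'filter', 'transform']):
--         return 'data_processing'
--
--     # Conditional Logic
--     if any(word in name_lower for word in ['if', 'condition', 'switch', 'merge']):
--         return 'conditional_logic'
--     if any(word in node_types_str for word in ['if', 'switch', 'merge']):
--         return 'conditional_logic'
--
--     # Productivity
--     if any(word in name_lower for word in ['asana', 'trello', 'notion', 'calendar']):
--         return 'productivity'
--     if any(word in node_types_str for word in ['asana', 'trello']):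
--         return 'productivity'
--
--     # Automation Core
--     if any(word in name_lower for word in ['trigger', 'schedule', 'cron', 'wait']):
--         return 'automation_core'
--     if any(word in node_types_str for word in ['trigger', 'schedule', 'cron']):
--         return 'automation_core'
--
--     return 'other'
-- ===== SOURCE B (Python) =====
-- # Different algorithm: flatten all rules into one flat priority-tagged keyword table,
-- # collect ALL matching keywords in a single exhaustive pass, and return the category
-- # of the lowest-priority hit (arg-min) instead of a short-circuiting if-chain.
-- # Correct because earlier rules have strictly smaller priorities and keywords sharing
-- # a priority share a category, so the minimum-priority hit is exactly the first
-- # matching rule of the original chain.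
--
-- RULES = [
--     (['email', 'gmail', 'smtp', 'imap'], ['email', 'gmail'], 'email'),
--     (['openai', 'ai', 'llm', 'chat', 'langchain'], ['openai', 'langchain', 'chat'], 'ai_llm'),
--     (['http', 'api', 'webhook', 'request'], ['http', 'webhook'], 'http_api'),
--     (['mysql', 'postgres', 'mongodb', 'database', 'sql'], ['mysql', 'postgres', 'mongodb'], 'database'),
--     (['google', 'gmail', 'drive', 'sheets', 'docs'], ['google', 'gmail'], 'google_services'),
--     (['slack', 'telegram', 'discord', 'message'], ['slack', 'telegram'], 'messaging'),
--     (['twitter', 'facebook', 'linkedin', 'social'], ['twitter'], 'social_media'),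
--     (['file', 'csv', 'json', 'pdf', 'xml'], ['file', 'csv', 'json', 'pdf'], 'file_processing'),
--     (['data', 'processor', 'transform', 'filter', 'set'], ['set', 'filter', 'transform'], 'data_processing'),
--     (['if', 'condition', 'switch', 'merge'], ['if', 'switch', 'merge'], 'conditional_logic'),
--     (['asana', 'trello', 'notion', 'calendar'], ['asana', 'trello'], 'productivity'),
--     (['trigger', 'schedule', 'cron', 'wait'], ['trigger', 'schedule', 'cron'], 'automation_core'),
-- ]
--
-- # One entry per keyword: (priority, word, search_in_name, category).
-- KEYWORDS = [(pri, word, in_name, cat)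
--             for pri, (name_words, node_words, cat) in enumerate(RULES)
--             for words, in_name in ((name_words, True), (node_words, False))
--             for word in words]
--
--
-- def categorize_driver(driver_name: str, node_types: list) -> str:
--     name = driver_name.lower()
--     tags = ' '.join(node_types).lower()
--     hits = [(pri, cat) for pri, word, in_name, cat in KEYWORDS
--             if word in (name if in_name else tags)]
--     return min(hits, key=lambda h: h[0], default=(0, 'other'))[1]
-- ===== Notes on version B (the rewrite author's own statement) =====
-- stated objective: alternative
-- what changed: Instead of A's short-circuiting chain of 24 keyword if-blocks, B flattens all rules into one priority-tagged keyword table, collects every matching keyword in a single exhaustive pass and returns the category of the minimum-priority hit (arg-min), falling back to 'other' when nothing matches.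
import Mathlib
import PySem

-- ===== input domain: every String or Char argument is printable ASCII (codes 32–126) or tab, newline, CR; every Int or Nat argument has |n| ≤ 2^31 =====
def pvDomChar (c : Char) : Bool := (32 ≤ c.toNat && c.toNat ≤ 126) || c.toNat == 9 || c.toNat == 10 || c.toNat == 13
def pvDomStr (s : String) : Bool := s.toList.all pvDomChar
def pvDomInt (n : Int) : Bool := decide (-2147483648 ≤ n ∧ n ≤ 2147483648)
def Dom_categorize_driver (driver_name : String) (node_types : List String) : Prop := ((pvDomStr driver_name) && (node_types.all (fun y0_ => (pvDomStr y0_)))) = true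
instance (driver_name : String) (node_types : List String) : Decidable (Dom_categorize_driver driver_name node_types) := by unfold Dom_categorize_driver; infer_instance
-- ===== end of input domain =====

-- B flattens the rules into one priority-tagged keyword table, collects all matching
-- keywords in a single exhaustive pass and returns the lowest-priority hit's category
-- (arg-min) instead of A's short-circuiting if-chain; objective: alternative.

-- ===== PORT A =====
-- any(word in s for word in ws)
def pvAnyIn (ws : List String) (s : String) : Bool :=
  ws.any (fun w => PySem.Str.isIn w s)

def categorize_driver (driver_name : String) (node_types : List String) : String :=
  let name_lower := PySem.Str.lower driver_name
  let node_types_str := PySem.Str.lower (PySem.Str.join " " node_types)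
  if pvAnyIn ["email", "gmail", "smtp", "imap"] name_lower then "email"
  else if pvAnyIn ["email", "gmail"] node_types_str then "email"
  else if pvAnyIn ["openai", "ai", "llm", "chat", "langchain"] name_lower then "ai_llm"
  else if pvAnyIn ["openai", "langchain", "chat"] node_types_str then "ai_llm"
  else if pvAnyIn ["http", "api", "webhook", "request"] name_lower then "http_api"
  else if pvAnyIn ["http", "webhook"] node_types_str then "http_api"
  else if pvAnyIn ["mysql", "postgres", "mongodb", "database", "sql"] name_lower then "database"
  else if pvAnyIn ["mysql", "postgres", "mongodb"] node_types_str then "database"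
  else if pvAnyIn ["google", "gmail", "drive", "sheets", "docs"] name_lower then "google_services"
  else if pvAnyIn ["google", "gmail"] node_types_str then "google_services"
  else if pvAnyIn ["slack", "telegram", "discord", "message"] name_lower then "messaging"
  else if pvAnyIn ["slack", "telegram"] node_types_str then "messaging"
  else if pvAnyIn ["twitter", "facebook", "linkedin", "social"] name_lower then "social_media"
  else if pvAnyIn ["twitter"] node_types_str then "social_media"
  else if pvAnyIn ["file", "csv", "json", "pdf", "xml"] name_lower then "file_processing"
  else if pvAnyIn ["file", "csv", "json", "pdf"] node_types_str then "file_processing"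
  else if pvAnyIn ["data", "processor", "transform", "filter", "set"] name_lower then "data_processing"
  else if pvAnyIn ["set", "filter", "transform"] node_types_str then "data_processing"
  else if pvAnyIn ["if", "condition", "switch", "merge"] name_lower then "conditional_logic"
  else if pvAnyIn ["if", "switch", "merge"] node_types_str then "conditional_logic"
  else if pvAnyIn ["asana", "trello", "notion", "calendar"] name_lower then "productivity"
  else if pvAnyIn ["asana", "trello"] node_types_str then "productivity"
  else if pvAnyIn ["trigger", "schedule", "cron", "wait"] name_lower then "automation_core"
  else if pvAnyIn ["trigger", "schedule", "cron"] node_types_str then "automation_core"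
  else "other"

-- ===== PORT B =====
-- Source B's RULES table
def pvRules : List (List String × List String × String) :=
  [ (["email", "gmail", "smtp", "imap"], ["email", "gmail"], "email"),
    (["openai", "ai", "llm", "chat", "langchain"], ["openai", "langchain", "chat"], "ai_llm"),
    (["http", "api", "webhook", "request"], ["http", "webhook"], "http_api"),
    (["mysql", "postgres", "mongodb", "database", "sql"], ["mysql", "postgres", "mongodb"], "database"),
    (["google", "gmail", "drive", "sheets", "docs"], ["google", "gmail"], "google_services"),
    (["slack", "telegram", "discord", "message"], ["slack", "telegram"], "messaging"),
    (["twitter", "facebook", "linkedin", "social"], ["twitter"], "social_media"),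
    (["file", "csv", "json", "pdf", "xml"], ["file", "csv", "json", "pdf"], "file_processing"),
    (["data", "processor", "transform", "filter", "set"], ["set", "filter", "transform"], "data_processing"),
    (["if", "condition", "switch", "merge"], ["if", "switch", "merge"], "conditional_logic"),
    (["asana", "trello", "notion", "calendar"], ["asana", "trello"], "productivity"),
    (["trigger", "schedule", "cron", "wait"], ["trigger", "schedule", "cron"], "automation_core") ]

-- Source B's KEYWORDS table: one (priority, word, in_name, category) entry per keyword
def pvKeywords : List (Int × String × Bool × String) :=
  (PySem.List.enumerate pvRules).flatMap (fun pr =>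
    ([(pr.2.1, true), (pr.2.2.1, false)] : List (List String × Bool)).flatMap (fun wi =>
      wi.1.map (fun w => (pr.1, w, wi.2, pr.2.2.2))))

def categorize_driver_alt (driver_name : String) (node_types : List String) : String :=
  let name := PySem.Str.lower driver_name
  let tags := PySem.Str.lower (PySem.Str.join " " node_types)
  let hits := pvKeywords.filterMap (fun e =>
    if PySem.Str.isIn e.2.1 (if e.2.2.1 then name else tags) then some (e.1, e.2.2.2) else none)
  (PySem.List.minD hits (fun h => h.1) ((0 : Int), "other")).2

-- ===== PRECONDITION & SPEC =====
def Spec_categorize_driver (driver_name : String) (node_types : List String) (out : String) : Prop := out = categorize_driver_alt driver_name node_types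
instance (driver_name : String) (node_types : List String) (out : String) : Decidable (Spec_categorize_driver driver_name node_types out) := by unfold Spec_categorize_driver; infer_instance

-- ===== CLAIM (what is proved, stated in full; the proofs are below) =====
def Claim_equal_categorize_driver : Prop := ∀ (driver_name : String) (node_types : List String), Dom_categorize_driver driver_name node_types → Spec_categorize_driver driver_name node_types (categorize_driver driver_name node_types)

-- ===== LEMMAS AND PROOFS =====

-- Python's min never replaces the accumulator once it holds an element no later key beats
theorem pv_min_foldl_const {α : Type} (key : α → Int) (m : α) (xs : List α)
    (h : ∀ x ∈ xs, ¬ key x < key m) :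
    xs.foldl (fun acc x => match acc with
      | none => some x
      | some m' => if key x < key m' then some x else some m') (some m) = some m := by
  induction xs with
  | nil => rfl
  | cons x t ih =>
    have hx : ¬ key x < key m := h x (List.mem_cons_self)
    simp only [List.foldl_cons, if_neg hx]
    exact ih (fun y hy => h y (List.mem_cons_of_mem _ hy))

-- on a list sorted non-decreasingly by the key, the first extremal element is the head
theorem pv_min?_sorted {α : Type} (key : α → Int) (xs : List α)
    (h : xs.Pairwise (fun a b => key a ≤ key b)) :
    PySem.List.min? xs key = xs.head? := by
  cases xs with
  | nil => rfl
  | cons x t =>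
    rcases List.pairwise_cons.mp h with ⟨hx, _⟩
    simp only [PySem.List.min?, List.foldl_cons, List.head?_cons]
    exact pv_min_foldl_const key x t (fun y hy => not_lt.mpr (hx y hy))

-- a guarded findSome? is a find? followed by a map
theorem pv_findSome_eq_find? {α β : Type} (p : α → Bool) (g : α → β) (l : List α) :
    l.findSome? (fun e => if p e then some (g e) else none) = (l.find? p).map g := by
  induction l with
  | nil => simp
  | cons a t ih => by_cases h : p a = true <;> simp [h, ih]

-- one step of the first-match scan, with the final projection pushed inside
theorem pv_find_proj {α : Type} (p : α → Bool) (g : α → Int × String) (d : Int × String)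
    (r : α) (rs : List α) :
    ((((r :: rs).find? p).map g).getD d).2
      = if p r then (g r).2 else (((rs.find? p).map g).getD d).2 := by
  by_cases h : p r = true <;> simp [h]

-- split a disjunctive guard into the chain of single-word guards
theorem pv_if_split (a b : Bool) (x r : String) :
    (if a || b then x else r) = if a then x else if b then x else r := by
  cases a <;> simp

-- ===== VERDICT (by name: the statement is the Claim_ definition above) =====
set_option maxRecDepth 8192 in
set_option maxHeartbeats 2000000 in
theorem categorize_driver_spec : Claim_equal_categorize_driver := by
  intro driver_name node_types _
  show categorize_driver driver_name node_types = categorize_driver_alt driver_name node_types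
  simp only [categorize_driver, categorize_driver_alt]
  have hkey : ∀ (e : Int × String × Bool × String) (z : Int × String),
      (if PySem.Str.isIn e.2.1 (if e.2.2.1 then PySem.Str.lower driver_name
          else PySem.Str.lower (PySem.Str.join " " node_types)) then some (e.1, e.2.2.2)
        else none) = some z → z.1 = e.1 := by
    intro e z h
    by_cases hc : PySem.Str.isIn e.2.1 (if e.2.2.1 then PySem.Str.lower driver_name
        else PySem.Str.lower (PySem.Str.join " " node_types)) = true
    · rw [if_pos hc] at h; injection h with h2; rw [← h2]
    · rw [if_neg hc] at h; cases h
  have hpair : (pvKeywords.filterMap (fun e =>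
      if PySem.Str.isIn e.2.1 (if e.2.2.1 then PySem.Str.lower driver_name
        else PySem.Str.lower (PySem.Str.join " " node_types)) then some (e.1, e.2.2.2)
      else none)).Pairwise (fun a b : Int × String => a.1 ≤ b.1) := by
    rw [List.pairwise_filterMap]
    have hkw : pvKeywords.Pairwise (fun a b => a.1 ≤ b.1) := by decide
    refine hkw.imp ?_
    intro a b hab x hx y hy
    rw [hkey a x hx, hkey b y hy]; exact hab
  rw [PySem.List.minD, pv_min?_sorted _ _ hpair, List.head?_filterMap,
    pv_findSome_eq_find? (fun e : Int × String × Bool × String =>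
        PySem.Str.isIn e.2.1 (if e.2.2.1 then PySem.Str.lower driver_name
          else PySem.Str.lower (PySem.Str.join " " node_types)))
      (fun e => (e.1, e.2.2.2)) pvKeywords]
  simp only [pvKeywords, pvRules, PySem.List.enumerate_cons, PySem.List.enumerate_nil,
    List.flatMap_cons, List.flatMap_nil, List.map_cons, List.map_nil, List.append_nil,
    List.cons_append, List.nil_append, pv_find_proj, List.find?_nil,
    pvAnyIn, List.any_cons, List.any_nil, Bool.or_false, pv_if_split,
    Bool.false_eq_true, if_true, if_false,
    Option.map_none, Option.getD_none]
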